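-- pv_equiv track=rewrite | github.com/yahshibu/nested-ner-tacl2020-transformers | util/evaluate.py | count_overlap
-- ===== SOURCE A (Python) =====
-- from typing import List, Tuple
--
-- def count_overlap(entities: List[List[Tuple[int, int, int]]]) -> Tuple[int, int]:
--     """
--     Counting the # of crossing structures
--     Naive way
--     """
--     num_cross = 0
--     num_nest = 0
--     for ets in entities:
--         len_ets = len(ets)
--         if len_ets == 0:
--             continue
--         for i in range(len_ets-1):
--             candidates = ets[i+1:]
--             focus = ets[i]
--             for cand in candidates:
--                 if focus[0] < cand[0] < focus[1] < cand[1]: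
--                     num_cross += 1
--                 if (focus[0] <= cand[0] and cand[1] <= focus[1]) or (cand[0] <= focus[0] and focus[1] <= cand[1]):
--                     num_nest += 1
--     return num_cross, num_nest
-- ===== SOURCE B (Python) =====
-- from typing import List, Tuple
--
-- def _sort_count(xs):
--     """Merge sort; returns (sorted xs, number of pairs i<j with xs[j] <= xs[i])."""
--     if len(xs) <= 1:
--         return xs, 0
--     mid = len(xs) // 2
--     left, c_left = _sort_count(xs[:mid])
--     right, c_right = _sort_count(xs[mid:])
--     merged = []
--     count = c_left + c_right
--     i = j = 0
--     while i < len(left) and j < len(right):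
--         if left[i] < right[j]:
--             merged.append(left[i]); i += 1
--         else:
--             count += len(left) - i
--             merged.append(right[j]); j += 1
--     merged.extend(left[i:])
--     merged.extend(right[j:])
--     return merged, count
--
-- def count_overlap(entities: List[List[Tuple[int, int, int]]]) -> Tuple[int, int]:
--     """
--     Counting the # of crossing structures
--     Nesting pairs: after a stable sort by (start, -end), a pair nests exactly
--     when the later end does not exceed the earlier one, so the nesting count is
--     the number of non-ascents of the end sequence, counted by merge sort.
--     Crossing pairs: sweep the sentence keeping the previous (end, start) pairs
--     ordered by end; each new interval counts the previous ends falling strictly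
--     inside it that belong to an interval starting strictly earlier.
--     """
--     num_cross = 0
--     num_nest = 0
--     for ets in entities:
--         ends = [t[1] for t in sorted(ets, key=lambda t: (t[0], -t[1]))]
--         num_nest += _sort_count(ends)[1]
--         buf = []  # previous intervals as (end, start), sorted by end
--         for s, e, _ in ets:
--             for ee, ss in buf:
--                 if e <= ee:
--                     break
--                 if s < ee and ss < s:
--                     num_cross += 1
--             k = 0
--             while k < len(buf) and buf[k][0] <= e:
--                 k += 1
--             buf.insert(k, (e, s))
--     return num_cross, num_nest
-- ===== Notes on version B (the rewrite author's own statement) =====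
-- stated objective: alternative
-- what changed: Replaces A's all-pairs double scan per sentence by two different algorithms: nesting pairs are counted as the non-ascents of the end sequence after a stable sort by (start, -end), via a counting merge sort; crossing pairs are counted by a sweep that keeps the previously seen (end, start) pairs ordered by end and, for each new interval, scans only up to the first previous end >= its own end.
import Mathlib
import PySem

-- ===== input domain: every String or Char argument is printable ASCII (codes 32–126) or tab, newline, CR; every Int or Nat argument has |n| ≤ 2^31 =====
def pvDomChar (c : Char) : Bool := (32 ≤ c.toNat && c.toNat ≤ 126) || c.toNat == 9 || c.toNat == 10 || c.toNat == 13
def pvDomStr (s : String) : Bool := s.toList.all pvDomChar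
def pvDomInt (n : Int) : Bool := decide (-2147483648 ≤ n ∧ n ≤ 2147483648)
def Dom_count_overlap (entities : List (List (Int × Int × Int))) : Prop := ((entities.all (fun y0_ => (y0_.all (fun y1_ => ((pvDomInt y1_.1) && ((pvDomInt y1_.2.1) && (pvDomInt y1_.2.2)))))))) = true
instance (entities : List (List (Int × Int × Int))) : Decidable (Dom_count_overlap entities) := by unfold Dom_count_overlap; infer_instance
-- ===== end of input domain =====

-- B counts nesting pairs by a merge sort (non-ascents of the end sequence after
-- sorting by (start, -end)) and crossing pairs by a sweep over a list of the
-- previous intervals kept ordered by end (alternative algorithm, same results).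

-- ===== PORT A =====
-- inner `for cand in candidates` body: the two ifs, in Python's order
def pvStepInner (focus : Int × Int × Int) (acc : Int × Int) (cand : Int × Int × Int) : Int × Int :=
  let acc := if focus.1 < cand.1 ∧ cand.1 < focus.2.1 ∧ focus.2.1 < cand.2.1
             then (acc.1 + 1, acc.2) else acc
  if (focus.1 ≤ cand.1 ∧ cand.2.1 ≤ focus.2.1) ∨ (cand.1 ≤ focus.1 ∧ focus.2.1 ≤ cand.2.1)
  then (acc.1, acc.2 + 1) else acc

-- body of `for i in range(len_ets-1)`: candidates = ets[i+1:], focus = ets[i]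
def pvBodyA (ets : List (Int × Int × Int)) (acc : Int × Int) (i : Int) : Int × Int :=
  let candidates := PySem.List.slice ets (some (i + 1)) none
  match PySem.List.pyGet? ets i with
  | some focus => candidates.foldl (pvStepInner focus) acc
  | none => acc

def pvSentA (acc : Int × Int) (ets : List (Int × Int × Int)) : Int × Int :=
  let len_ets : Int := ets.length
  if len_ets == 0 then acc
  else (PySem.List.pyRange 0 (len_ets - 1) 1).foldl (pvBodyA ets) acc

def count_overlap (entities : List (List (Int × Int × Int))) : Int × Int :=
  entities.foldl pvSentA (0, 0)

-- ===== PORT B =====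
-- merge step of _sort_count: the while loop plus the two extends, on lists
def pvMerge : List Int → List Int → List Int × Int
  | [], r => (r, 0)
  | a :: l, [] => (a :: l, 0)
  | a :: l, b :: r =>
    if a < b then
      let m := pvMerge l (b :: r)
      (a :: m.1, m.2)
    else
      let m := pvMerge (a :: l) r
      (b :: m.1, m.2 + ((a :: l).length : Int))
termination_by l r => l.length + r.length

-- _sort_count: merge sort returning (sorted list, # pairs i<j with xs[j] <= xs[i])
def pvSortCount (xs : List Int) : List Int × Int :=
  if _h : xs.length ≤ 1 then (xs, 0)
  else
    let mid := xs.length / 2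
    let L := pvSortCount (xs.take mid)
    let R := pvSortCount (xs.drop mid)
    let m := pvMerge L.1 R.1
    (m.1, L.2 + R.2 + m.2)
termination_by xs.length
decreasing_by
  · simp [List.length_take]; omega
  · simp [List.length_drop]; omega

-- `for ee, ss in buf: if e <= ee: break; if s < ee and ss < s: num_cross += 1`
def pvWin : List (Int × Int) → Int → Int → Int
  | [], _, _ => 0
  | p :: l, s, e =>
    if e ≤ p.1 then 0
    else (if s < p.1 ∧ p.2 < s then 1 else 0) + pvWin l s e

-- the `while k < len(buf) and buf[k][0] <= e` search plus `buf.insert(k, (e, s))`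
def pvIns (x : Int × Int) : List (Int × Int) → List (Int × Int)
  | [] => [x]
  | p :: l => if p.1 ≤ x.1 then p :: pvIns x l else x :: p :: l

-- one sentence of B: nesting via sort + merge count, crossing via the buf sweep
def pvSentB (acc : Int × Int) (ets : List (Int × Int × Int)) : Int × Int :=
  let ends := (PySem.List.sorted ets (fun t => toLex (t.1, -t.2.1))).map (fun t => t.2.1)
  let nn := acc.2 + (pvSortCount ends).2
  let st := ets.foldl (fun st t =>
      (pvIns (t.2.1, t.1) st.1, st.2 + pvWin st.1 t.1 t.2.1)) ([], acc.1)
  (st.2, nn)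

def count_overlap_alt (entities : List (List (Int × Int × Int))) : Int × Int :=
  entities.foldl pvSentB (0, 0)

-- ===== PRECONDITION & SPEC =====
def Spec_count_overlap (entities : List (List (Int × Int × Int))) (out : Int × Int) : Prop := out = count_overlap_alt entities
instance (entities : List (List (Int × Int × Int))) (out : Int × Int) : Decidable (Spec_count_overlap entities out) := by unfold Spec_count_overlap; infer_instance

-- ===== CLAIM (what is proved, stated in full; the proofs are below) =====
def Claim_equal_count_overlap : Prop := ∀ (entities : List (List (Int × Int × Int))), Dom_count_overlap entities → Spec_count_overlap entities (count_overlap entities)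

-- ===== LEMMAS AND PROOFS =====

-- the mathematical content both programs compute: per-sentence pair counts
def pvCross (f c : Int × Int × Int) : Bool := decide (f.1 < c.1 ∧ c.1 < f.2.1 ∧ f.2.1 < c.2.1)
def pvNest (f c : Int × Int × Int) : Bool :=
  decide ((f.1 ≤ c.1 ∧ c.2.1 ≤ f.2.1) ∨ (c.1 ≤ f.1 ∧ f.2.1 ≤ c.2.1))

def pvPairs : List (Int × Int × Int) → Int × Int
  | [] => (0, 0)
  | x :: xs => (((xs.countP (fun c => pvCross x c) : Nat) : Int) + (pvPairs xs).1,
                ((xs.countP (fun c => pvNest x c) : Nat) : Int) + (pvPairs xs).2)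

-- ---------- A-side ----------
lemma pvInnerA (focus : Int × Int × Int) :
    ∀ (cs : List (Int × Int × Int)) (acc : Int × Int),
      cs.foldl (pvStepInner focus) acc
        = (acc.1 + ((cs.countP (fun c => pvCross focus c) : Nat) : Int),
           acc.2 + ((cs.countP (fun c => pvNest focus c) : Nat) : Int)) := by
  intro cs
  induction cs with
  | nil => intro acc; simp
  | cons x xs ih =>
    intro acc
    simp only [List.foldl_cons, ih, List.countP_cons, pvStepInner, pvCross, pvNest]
    by_cases h1 : focus.1 < x.1 ∧ x.1 < focus.2.1 ∧ focus.2.1 < x.2.1 <;>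
      by_cases h2 : (focus.1 ≤ x.1 ∧ x.2.1 ≤ focus.2.1) ∨ (x.1 ≤ focus.1 ∧ focus.2.1 ≤ x.2.1) <;>
      simp [h1, h2] <;> omega

lemma pvSentA_shift :
    ∀ (rest pre : List (Int × Int × Int)) (acc : Int × Int),
      (List.range rest.length).foldl
          (fun acc k => pvBodyA (pre ++ rest) acc ((pre.length + k : Nat) : Int)) acc
        = (acc.1 + (pvPairs rest).1, acc.2 + (pvPairs rest).2) := by
  intro rest
  induction rest with
  | nil => intro pre acc; simp [pvPairs]
  | cons x xs ih =>
    intro pre acc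
    have hget : PySem.List.pyGet? (pre ++ x :: xs) ((pre.length + 0 : Nat) : Int) = some x := by
      have h0 : ((pre.length + 0 : Nat) : Int) = (pre.length : Int) := by push_cast; ring
      rw [h0]
      exact PySem.List.pyGet?_append_length (pre := pre) (y := x) (ys := xs)
    have hslice : PySem.List.slice (pre ++ x :: xs) (some (((pre.length + 0 : Nat) : Int) + 1)) none = xs := by
      have h1 : (((pre.length + 0 : Nat) : Int) + 1) = ((pre.length + 1 : Nat) : Int) := by push_cast; ring
      rw [h1, PySem.List.slice_from_natCast]
      simp
    have hbody : ∀ acc', pvBodyA (pre ++ x :: xs) acc' ((pre.length + 0 : Nat) : Int)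
        = (acc'.1 + ((xs.countP (fun c => pvCross x c) : Nat) : Int),
           acc'.2 + ((xs.countP (fun c => pvNest x c) : Nat) : Int)) := by
      intro acc'
      simp only [pvBodyA, hget, hslice, pvInnerA, pvCross, pvNest]
    have hcongr : ∀ (a : Int × Int), ∀ k ∈ List.range xs.length,
        pvBodyA (pre ++ x :: xs) a ((pre.length + (k + 1) : Nat) : Int)
          = pvBodyA ((pre ++ [x]) ++ xs) a (((pre ++ [x]).length + k : Nat) : Int) := by
      intro a k _
      have h1 : pre ++ x :: xs = (pre ++ [x]) ++ xs := by simp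
      have h2 : (pre.length + (k + 1) : Nat) = ((pre ++ [x]).length + k : Nat) := by
        simp; omega
      rw [h1, h2]
    calc (List.range (x :: xs).length).foldl
            (fun acc k => pvBodyA (pre ++ x :: xs) acc ((pre.length + k : Nat) : Int)) acc
        = (List.range xs.length).foldl
            (fun acc k => pvBodyA (pre ++ x :: xs) acc ((pre.length + (k + 1) : Nat) : Int))
            (pvBodyA (pre ++ x :: xs) acc ((pre.length + 0 : Nat) : Int)) := by
          simp only [List.length_cons, List.range_succ_eq_map, List.foldl_cons, List.foldl_map,
            Nat.succ_eq_add_one]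
      _ = (List.range xs.length).foldl
            (fun acc k => pvBodyA ((pre ++ [x]) ++ xs) acc (((pre ++ [x]).length + k : Nat) : Int))
            (pvBodyA (pre ++ x :: xs) acc ((pre.length + 0 : Nat) : Int)) := by
          apply PySem.List.foldl_congr_mem
          intro a k hk; exact hcongr a k hk
      _ = (acc.1 + (pvPairs (x :: xs)).1, acc.2 + (pvPairs (x :: xs)).2) := by
          rw [ih (pre ++ [x]), hbody]
          simp [pvPairs]; constructor <;> ring

lemma pvSentA_eq (ets : List (Int × Int × Int)) (acc : Int × Int) :
    pvSentA acc ets = (acc.1 + (pvPairs ets).1, acc.2 + (pvPairs ets).2) := by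
  rcases ets with _ | ⟨x, xs⟩
  · simp [pvSentA, pvPairs]
  · set l := x :: xs with hl
    have hlen : l.length = xs.length + 1 := by simp [hl]
    have hne : ((l.length : Int) == 0) = false := by
      simp [hlen]; omega
    have hrange : PySem.List.pyRange 0 ((l.length : Int) - 1) 1
        = (List.range xs.length).map (fun k => ((k : Nat) : Int)) := by
      rw [PySem.List.pyRange_one]
      have : (((l.length : Int) - 1) - 0).toNat = xs.length := by simp [hlen]
      rw [this]
      simp
    have hlast : ∀ a : Int × Int, pvBodyA l a ((xs.length : Nat) : Int) = a := by
      intro a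
      have hsl : PySem.List.slice l (some (((xs.length : Nat) : Int) + 1)) none = [] := by
        have h1 : (((xs.length : Nat) : Int) + 1) = ((xs.length + 1 : Nat) : Int) := by push_cast; ring
        rw [h1, PySem.List.slice_from_natCast]
        simp [hl]
      simp only [pvBodyA, hsl]
      cases PySem.List.pyGet? l ((xs.length : Nat) : Int) <;> simp
    have hfold : (List.range l.length).foldl (fun a k => pvBodyA l a ((k : Nat) : Int)) acc
        = (acc.1 + (pvPairs l).1, acc.2 + (pvPairs l).2) := by
      have := pvSentA_shift l [] acc
      simp only [List.nil_append, List.length_nil, Nat.zero_add] at this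
      simpa using this
    have hsplit : (List.range l.length).foldl (fun a k => pvBodyA l a ((k : Nat) : Int)) acc
        = pvBodyA l ((List.range xs.length).foldl (fun a k => pvBodyA l a ((k : Nat) : Int)) acc)
            ((xs.length : Nat) : Int) := by
      rw [hlen, List.range_succ, List.foldl_append]
      simp
    have : (List.range xs.length).foldl (fun a k => pvBodyA l a ((k : Nat) : Int)) acc
        = (acc.1 + (pvPairs l).1, acc.2 + (pvPairs l).2) := by
      rw [← hfold, hsplit, hlast]
    simp only [pvSentA, hne, Bool.false_eq_true, if_false, hrange, List.foldl_map]
    exact this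

-- ---------- B-side: nesting count ----------
lemma pvNest_symm (a b : Int × Int × Int) : pvNest a b = pvNest b a := by
  simp only [pvNest, decide_eq_decide]
  tauto

-- the nesting pair count is invariant under permutation (pvNest is symmetric)
lemma pvPairs_nest_perm {l l' : List (Int × Int × Int)} (h : l.Perm l') :
    (pvPairs l).2 = (pvPairs l').2 := by
  induction h with
  | nil => rfl
  | cons x h ih =>
    simp only [pvPairs, ih, h.countP_eq]
  | swap x y t =>
    simp only [pvPairs, List.countP_cons, pvNest_symm x y]
    push_cast
    ring
  | trans _ _ ih1 ih2 => exact ih1.trans ih2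

-- # pairs i<j with xs[j] ≤ xs[i]
def pvNP : List Int → Int
  | [] => 0
  | x :: t => ((t.countP (fun y => decide (y ≤ x)) : Nat) : Int) + pvNP t

-- on a list sorted by (start, -end), a pair nests iff the later end is ≤ the earlier
lemma pvPairs_nest_sorted :
    ∀ (l : List (Int × Int × Int)),
      l.Pairwise (fun a b => toLex (a.1, -a.2.1) ≤ toLex (b.1, -b.2.1)) →
      (pvPairs l).2 = pvNP (l.map (fun t => t.2.1)) := by
  intro l
  induction l with
  | nil => intro _; rfl
  | cons x t ih =>
    intro hp
    rcases List.pairwise_cons.mp hp with ⟨hx, ht⟩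
    simp only [pvPairs, pvNP, List.map_cons, List.countP_map, ih ht]
    congr 2
    apply List.countP_congr
    intro y hy
    have := hx y hy
    rw [Prod.Lex.toLex_le_toLex] at this
    simp only [pvNest, Function.comp]
    constructor
    · intro h
      simp only [decide_eq_true_eq] at *
      rcases this with h' | h' <;> omega
    · intro h
      simp only [decide_eq_true_eq] at *
      rcases this with h' | h' <;> omega

-- cross-count of the merge: for each y in r, the elements of l that are ≥ y
def pvCrossN (l r : List Int) : Int :=
  (r.map (fun y => ((l.countP (fun x => decide (y ≤ x)) : Nat) : Int))).sum

lemma pvCrossN_nil_left (r : List Int) : pvCrossN [] r = 0 := by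
  simp [pvCrossN]

lemma pvCrossN_perm_left {l l' : List Int} (r : List Int) (h : l.Perm l') :
    pvCrossN l r = pvCrossN l' r := by
  simp only [pvCrossN]
  congr 1
  apply List.map_congr_left
  intro y _
  rw [h.countP_eq]

lemma pvCrossN_perm_right (l : List Int) {r r' : List Int} (h : r.Perm r') :
    pvCrossN l r = pvCrossN l r' := by
  exact List.Perm.sum_eq (h.map _)

lemma pvNP_append : ∀ (u v : List Int), pvNP (u ++ v) = pvNP u + pvNP v + pvCrossN u v := by
  intro u
  induction u with
  | nil => intro v; simp [pvNP, pvCrossN_nil_left]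
  | cons x t ih =>
    intro v
    simp only [List.cons_append, pvNP, ih, List.countP_append, pvCrossN, List.countP_cons]
    have : (v.map (fun y => (((t.countP (fun x_1 => decide (y ≤ x_1)) : Nat) : Int)
              + if decide (y ≤ x) then (1:Int) else 0))).sum
        = (v.map (fun y => ((t.countP (fun x_1 => decide (y ≤ x_1)) : Nat) : Int))).sum
          + ((v.countP (fun y => decide (y ≤ x)) : Nat) : Int) := by
      rw [PySem.List.sum_map_add_int, PySem.List.sum_map_ite_one_zero]
    push_cast
    push_cast at this
    rw [this]
    ring

lemma pvCrossN_cons_right (u : List Int) (y : Int) (v : List Int) :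
    pvCrossN u (y :: v) = ((u.countP (fun x => decide (y ≤ x)) : Nat) : Int) + pvCrossN u v := by
  simp [pvCrossN]

lemma pvCrossN_cons_left (a : Int) (u v : List Int) :
    pvCrossN (a :: u) v
      = ((v.countP (fun y => decide (y ≤ a)) : Nat) : Int) + pvCrossN u v := by
  induction v with
  | nil => simp [pvCrossN]
  | cons y v ih =>
    rw [pvCrossN_cons_right, pvCrossN_cons_right, List.countP_cons, ih, List.countP_cons]
    by_cases h : y ≤ a <;> simp [h] <;> omega

lemma pvMerge_spec :
    ∀ (l r : List Int), l.Pairwise (· ≤ ·) → r.Pairwise (· ≤ ·) →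
      (pvMerge l r).1.Perm (l ++ r) ∧ (pvMerge l r).1.Pairwise (· ≤ ·)
        ∧ (pvMerge l r).2 = pvCrossN l r := by
  intro l
  induction l with
  | nil =>
    intro r _ hr
    simp only [pvMerge, List.nil_append]
    exact ⟨List.Perm.refl r, hr, (pvCrossN_nil_left r).symm⟩
  | cons a l ihl =>
    intro r
    induction r with
    | nil =>
      intro hl _
      simp only [pvMerge, List.append_nil]
      exact ⟨List.Perm.refl _, hl, by simp [pvCrossN]⟩
    | cons b r ihr =>
      intro hl hr
      rcases List.pairwise_cons.mp hl with ⟨hla, hlt⟩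
      rcases List.pairwise_cons.mp hr with ⟨hrb, hrt⟩
      by_cases hab : a < b
      · obtain ⟨hperm, hpw, hcnt⟩ := ihl (b :: r) hlt hr
        simp only [pvMerge, if_pos hab]
        refine ⟨hperm.cons a, ?_, ?_⟩
        · refine List.pairwise_cons.mpr ⟨?_, hpw⟩
          intro z hz
          rcases List.mem_append.mp (hperm.mem_iff.mp hz) with hz' | hz'
          · exact hla z hz'
          · rcases List.mem_cons.mp hz' with h' | h'
            · omega
            · have := hrb z h'; omega
        · rw [hcnt, pvCrossN_cons_left]
          have : (b :: r).countP (fun y => decide (y ≤ a)) = 0 := by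
            apply List.countP_eq_zero.mpr
            intro z hz
            rcases List.mem_cons.mp hz with h' | h'
            · simp only [decide_eq_true_eq]; omega
            · have := hrb z h'; simp only [decide_eq_true_eq]; omega
          rw [this]; simp
      · obtain ⟨hperm, hpw, hcnt⟩ := ihr hl hrt
        simp only [pvMerge, if_neg hab]
        refine ⟨?_, ?_, ?_⟩
        · exact (hperm.cons b).trans (List.perm_middle).symm
        · refine List.pairwise_cons.mpr ⟨?_, hpw⟩
          intro z hz
          rcases List.mem_append.mp (hperm.mem_iff.mp hz) with hz' | hz'
          · rcases List.mem_cons.mp hz' with h' | h'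
            · omega
            · have := hla z h'; omega
          · exact hrb z hz'
        · rw [hcnt, pvCrossN_cons_right]
          have : (a :: l).countP (fun x => decide (b ≤ x)) = (a :: l).length := by
            apply List.countP_eq_length.mpr
            intro z hz
            rcases List.mem_cons.mp hz with h' | h'
            · simp only [decide_eq_true_eq]; omega
            · have := hla z h'; simp only [decide_eq_true_eq]; omega
          rw [← this]; omega

lemma pvNP_short (xs : List Int) (h : xs.length ≤ 1) : pvNP xs = 0 := by
  match xs, h with
  | [], _ => rfl
  | [x], _ => simp [pvNP]

lemma pvSortCount_spec : ∀ (xs : List Int),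
    (pvSortCount xs).1.Perm xs ∧ (pvSortCount xs).1.Pairwise (· ≤ ·)
      ∧ (pvSortCount xs).2 = pvNP xs := by
  intro xs
  induction hn : xs.length using Nat.strong_induction_on generalizing xs with
  | _ n ih =>
  subst hn
  by_cases h : xs.length ≤ 1
  · rw [pvSortCount]
    simp only [dif_pos h]
    refine ⟨List.Perm.refl _, ?_, (pvNP_short xs h).symm⟩
    match xs, h with
    | [], _ => simp
    | [x], _ => simp
  · have h2 : 2 ≤ xs.length := by omega
    have htl : (xs.take (xs.length / 2)).length < xs.length := by
      simp [List.length_take]; omega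
    have hdl : (xs.drop (xs.length / 2)).length < xs.length := by
      simp [List.length_drop]; omega
    obtain ⟨Lp, Lw, Lc⟩ := ih _ htl (xs.take (xs.length / 2)) rfl
    obtain ⟨Rp, Rw, Rc⟩ := ih _ hdl (xs.drop (xs.length / 2)) rfl
    obtain ⟨Mp, Mw, Mc⟩ := pvMerge_spec _ _ Lw Rw
    rw [pvSortCount]
    simp only [dif_neg h]
    refine ⟨?_, Mw, ?_⟩
    · exact Mp.trans ((Lp.append Rp).trans (by rw [List.take_append_drop]))
    · rw [Lc, Rc, Mc, pvCrossN_perm_left _ Lp, pvCrossN_perm_right _ Rp,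
        ← pvNP_append, List.take_append_drop]

-- ---------- B-side: crossing count ----------
lemma pvIns_perm (x : Int × Int) : ∀ (l : List (Int × Int)), (pvIns x l).Perm (x :: l) := by
  intro l
  induction l with
  | nil => simp [pvIns]
  | cons p t ih =>
    simp only [pvIns]
    split_ifs
    · exact ((ih.cons p).trans (List.Perm.swap x p t))
    · exact List.Perm.refl _

lemma pvIns_sorted (x : Int × Int) :
    ∀ (l : List (Int × Int)), l.Pairwise (fun a b => a.1 ≤ b.1) →
      (pvIns x l).Pairwise (fun a b => a.1 ≤ b.1) := by
  intro l
  induction l with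
  | nil => intro _; simp [pvIns]
  | cons p t ih =>
    intro hp
    rcases List.pairwise_cons.mp hp with ⟨hpall, ht⟩
    simp only [pvIns]
    split_ifs with h
    · refine List.pairwise_cons.mpr ⟨?_, ih ht⟩
      intro z hz
      rcases List.mem_cons.mp ((pvIns_perm x t).mem_iff.mp hz) with h' | hz'
      · rw [h']; exact h
      · exact hpall z hz'
    · refine List.pairwise_cons.mpr ⟨?_, hp⟩
      intro z hz
      rcases List.mem_cons.mp hz with h' | hz'
      · rw [h']; omega
      · exact le_trans (by omega) (hpall z hz')

-- the window scan equals a full filter-count over a buf sorted by end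
lemma pvWin_eq_countP :
    ∀ (l : List (Int × Int)) (s e : Int), l.Pairwise (fun a b => a.1 ≤ b.1) →
      pvWin l s e = ((l.countP (fun p => decide (s < p.1 ∧ p.1 < e ∧ p.2 < s)) : Nat) : Int) := by
  intro l
  induction l with
  | nil => intro s e _; simp [pvWin]
  | cons p t ih =>
    intro s e hp
    rcases List.pairwise_cons.mp hp with ⟨hpall, ht⟩
    by_cases h : e ≤ p.1
    · have hz : ∀ z ∈ p :: t, ¬ (decide (s < z.1 ∧ z.1 < e ∧ z.2 < s)) = true := by
        intro z hz
        rcases List.mem_cons.mp hz with h' | hz'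
        · rw [h']; simp only [decide_eq_true_eq]; intro hcon; omega
        · have := hpall z hz'
          simp only [decide_eq_true_eq]; intro hcon; omega
      rw [List.countP_eq_zero.mpr hz]
      simp [pvWin, h]
    · simp only [pvWin, if_neg h, List.countP_cons, ih s e ht]
      by_cases hc : s < p.1 ∧ p.2 < s
      · have hd : (decide (s < p.1 ∧ p.1 < e ∧ p.2 < s)) = true := by
          simp only [decide_eq_true_eq]; omega
        rw [if_pos hc, hd]
        simp
        omega
      · have hd : (decide (s < p.1 ∧ p.1 < e ∧ p.2 < s)) = false := by
          simp only [decide_eq_false_iff_not]; intro hcon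
          exact hc ⟨hcon.1, hcon.2.2⟩
        rw [if_neg hc, hd]
        push_cast; ring

-- the sweep over one sentence accumulates exactly the crossing pair count
lemma pvSweep_gen :
    ∀ (l seen : List (Int × Int × Int)) (buf : List (Int × Int)) (c : Int),
      buf.Perm (seen.map (fun t => (t.2.1, t.1))) →
      buf.Pairwise (fun a b => a.1 ≤ b.1) →
      (l.foldl (fun st t => (pvIns (t.2.1, t.1) st.1, st.2 + pvWin st.1 t.1 t.2.1)) (buf, c)).2
        = c + (l.map (fun y => ((seen.countP (fun f => pvCross f y) : Nat) : Int))).sum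
            + (pvPairs l).1 := by
  intro l
  induction l with
  | nil =>
    intro seen buf c _ _
    simp [pvPairs]
  | cons y l ih =>
    intro seen buf c hperm hpw
    simp only [List.foldl_cons]
    have hwin : pvWin buf y.1 y.2.1
        = ((seen.countP (fun f => pvCross f y) : Nat) : Int) := by
      rw [pvWin_eq_countP buf y.1 y.2.1 hpw]
      congr 1
      rw [hperm.countP_eq, List.countP_map]
      apply List.countP_congr
      intro f _
      simp only [Function.comp, pvCross, decide_eq_true_eq]
      constructor <;> intro hcon <;> exact ⟨by omega, by omega, by omega⟩
    have hperm' : (pvIns (y.2.1, y.1) buf).Perm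
        ((seen ++ [y]).map (fun t => (t.2.1, t.1))) := by
      refine (pvIns_perm _ buf).trans ?_
      rw [List.map_append]
      refine (hperm.cons _).trans ?_
      simpa using (List.perm_middle (a := (y.2.1, y.1))
        (l₁ := seen.map (fun t => (t.2.1, t.1))) (l₂ := [])).symm
    have hpw' : (pvIns (y.2.1, y.1) buf).Pairwise (fun a b => a.1 ≤ b.1) :=
      pvIns_sorted _ buf hpw
    rw [ih (seen ++ [y]) _ _ hperm' hpw', hwin]
    have hsum : (l.map (fun z => (((seen ++ [y]).countP (fun f => pvCross f z) : Nat) : Int))).sum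
        = (l.map (fun z => ((seen.countP (fun f => pvCross f z) : Nat) : Int))).sum
          + ((l.countP (fun z => pvCross y z) : Nat) : Int) := by
      have h1 : (l.map (fun z => (((seen ++ [y]).countP (fun f => pvCross f z) : Nat) : Int)))
          = l.map (fun z => ((seen.countP (fun f => pvCross f z) : Nat) : Int)
              + (if pvCross y z then (1:Int) else 0)) := by
        apply List.map_congr_left
        intro z _
        rw [List.countP_append]
        push_cast
        simp [List.countP_cons]
      rw [h1, PySem.List.sum_map_add_int, PySem.List.sum_map_ite_one_zero]
    rw [hsum]
    simp only [pvPairs, List.map_cons, List.sum_cons]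
    ring

lemma pvSentB_eq (ets : List (Int × Int × Int)) (acc : Int × Int) :
    pvSentB acc ets = (acc.1 + (pvPairs ets).1, acc.2 + (pvPairs ets).2) := by
  unfold pvSentB
  have hnest : (pvSortCount ((PySem.List.sorted ets (fun t => toLex (t.1, -t.2.1))).map
        (fun t => t.2.1))).2 = (pvPairs ets).2 := by
    rw [(pvSortCount_spec _).2.2, ← pvPairs_nest_sorted _ (PySem.List.sorted_pairwise ets _),
      pvPairs_nest_perm (PySem.List.sorted_perm ets _ _)]
  have hcross := pvSweep_gen ets [] [] acc.1 (by simp) (by simp)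
  simp only [List.countP_nil] at hcross
  simp only [hcross, hnest]
  simp

-- ===== VERDICT (by name: the statement is the Claim_ definition above) =====
theorem count_overlap_spec : Claim_equal_count_overlap := by
  intro entities _
  unfold Spec_count_overlap count_overlap count_overlap_alt
  suffices h : ∀ (es : List (List (Int × Int × Int))) (a : Int × Int),
      es.foldl pvSentA a = es.foldl pvSentB a by
    exact h entities (0, 0)
  intro es
  induction es with
  | nil => intro a; rfl
  | cons l ls ih =>
    intro a
    simp only [List.foldl_cons]
    rw [pvSentA_eq, pvSentB_eq]
    exact ih _
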